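-- pv_equiv track=rewrite | github.com/vinhisreal/TKN_algorithm | TKN.py | sort_transaction_items_by_total_order
-- ===== SOURCE A (Python) =====
-- def sort_transaction_items_by_total_order(
--     transactions: dict, sorted_secondary_a: list
-- ) -> dict:
--     """
--     Sort the items in each transaction based on a given total order.
--
--     Parameters:
--     transactions (dict): A dictionary of transactions, where each transaction is a dictionary of items and their quantities.
--     sorted_secondary_a (list): A list of items sorted according to a specific order.
--
--     Returns:
--     dict: A dictionary of sorted transactions, where each transaction is a dictionary of items and their quantities.
--           Only transactions containing items from sorted_secondary_a are included in the result.
--           The items in each transaction are sorted based on the total order.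
--     """
--     # Create a dictionary to store the order of each item based on sorted_secondary_a
--     item_order = {item: index for index, item in enumerate(sorted_secondary_a)}
--
--     # Sort the items in each transaction based on the defined order
--     sorted_transactions = {}
--     for transaction_id, items in transactions.items():
--         sorted_items = dict(
--             sorted(
--                 items.items(), key=lambda item: item_order.get(item[0], float("inf"))
--             )
--         )
--         sorted_transactions[transaction_id] = sorted_items
--
--     return sorted_transactions
-- ===== SOURCE B (Python) =====
-- def sort_transaction_items_by_total_order(
--     transactions: dict, sorted_secondary_a: list
-- ) -> dict:
--     # Decorate-sort-distribute: ONE global stable sort of all ordered entries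
--     # (rank, tid, k, v) replaces the per-transaction sorts; stability keeps each
--     # transaction's insertion order among its entries, so distributing the
--     # sorted pool back by transaction id yields each head already in order.
--     # Unordered items are appended afterwards in their original insertion order.
--     item_order = {item: index for index, item in enumerate(sorted_secondary_a)}
--     pool = [
--         (item_order[k], tid, k, v)
--         for tid, items in transactions.items()
--         for k, v in items.items()
--         if k in item_order
--     ]
--     pool.sort(key=lambda e: e[0])
--     heads = {tid: [] for tid in transactions}
--     for _, tid, k, v in pool:
--         heads[tid].append((k, v))
--     result = {}
--     for tid, items in transactions.items():
--         tail = [(k, v) for k, v in items.items() if k not in item_order]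
--         result[tid] = dict(heads[tid] + tail)
--     return result
-- ===== Notes on version B (the rewrite author's own statement) =====
-- stated objective: alternative
-- what changed: Instead of stably sorting every transaction's item dict on its own, B decorates all ordered entries of all transactions with their rank, performs ONE global stable sort of that pool, and distributes it back by transaction id (stability preserves each transaction's insertion order), appending unordered items in insertion order.
import Mathlib
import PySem

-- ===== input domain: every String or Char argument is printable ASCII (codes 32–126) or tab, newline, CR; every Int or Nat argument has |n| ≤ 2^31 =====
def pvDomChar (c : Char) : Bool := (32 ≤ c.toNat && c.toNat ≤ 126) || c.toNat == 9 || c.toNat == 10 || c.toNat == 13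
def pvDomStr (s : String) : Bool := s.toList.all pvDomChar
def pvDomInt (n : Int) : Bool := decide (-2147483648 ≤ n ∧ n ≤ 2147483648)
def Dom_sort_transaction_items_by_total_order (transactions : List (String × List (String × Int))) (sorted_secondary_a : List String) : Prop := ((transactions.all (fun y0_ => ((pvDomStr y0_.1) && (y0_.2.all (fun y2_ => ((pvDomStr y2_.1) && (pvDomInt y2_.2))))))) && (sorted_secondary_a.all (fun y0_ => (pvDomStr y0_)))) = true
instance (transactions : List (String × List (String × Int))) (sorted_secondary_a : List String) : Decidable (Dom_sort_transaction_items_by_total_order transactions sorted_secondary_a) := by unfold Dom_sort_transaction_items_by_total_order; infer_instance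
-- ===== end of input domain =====

-- B replaces A's per-transaction sorts by ONE global stable sort of all rank-decorated ordered
-- entries, distributed back by transaction id (objective: alternative; return value only — no
-- mutation in either).

-- item_order = {item: index for index, item in enumerate(sorted_secondary_a)} — identical first
-- line of both A and B, so it is a shared helper.
def pvItemOrder (sorted_secondary_a : List String) : PySem.Dict String Int :=
  (PySem.List.enumerate sorted_secondary_a).foldl (fun d p => d.insert p.2 p.1) PySem.Dict.empty

-- ===== PORT A =====
-- transactions.items(): the parameter is a Python dict, encoded as an association list; its
-- items() are (PySem.Dict.ofList transactions).items (exact).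
-- sorted(..., key=lambda item: item_order.get(item[0], float("inf"))): float("inf") is ported as
-- (len(sorted_secondary_a) : Int), which compares to every stored index (all < len) exactly as inf does.
def sort_transaction_items_by_total_order (transactions : List (String × List (String × Int))) (sorted_secondary_a : List String) : List (String × List (String × Int)) :=
  let item_order := pvItemOrder sorted_secondary_a
  let ts := (PySem.Dict.ofList transactions).items
  let sorted_transactions : PySem.Dict String (List (String × Int)) :=
    ts.foldl (fun st t =>
      let items := PySem.Dict.ofList t.2
      let sorted_items :=
        PySem.List.sorted items.items
          (fun item => ((item_order.get? item.1).getD ((sorted_secondary_a.length : Int))))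
      st.insert t.1 sorted_items) PySem.Dict.empty
  sorted_transactions.items

-- ===== PORT B =====
-- transactions.items() is ported as in A.  The pool comprehension guards `if k in item_order`
-- before reading item_order[k]: ported as a match on get? (exact).  The 4-tuple (rank, tid, k, v)
-- is the right-nested product.  heads[tid].append((k, v)) mutates the list stored under tid:
-- ported as re-inserting the extended list.  dict(heads[tid] + tail) is built from pairs whose
-- keys are pairwise distinct, so the dict's items are that pair list itself: ported as the list.
def sort_transaction_items_by_total_order_alt (transactions : List (String × List (String × Int))) (sorted_secondary_a : List String) : List (String × List (String × Int)) :=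
  let item_order := pvItemOrder sorted_secondary_a
  let ts := (PySem.Dict.ofList transactions).items
  let pool := ts.flatMap (fun t =>
    (PySem.Dict.ofList t.2).items.filterMap (fun q =>
      match item_order.get? q.1 with
      | some r => some (r, (t.1, q))
      | none => none))
  let pool' := PySem.List.sorted pool (fun e => e.1)
  let heads0 := ts.foldl (fun h t => h.insert t.1 ([] : List (String × Int))) PySem.Dict.empty
  let heads := pool'.foldl (fun h e =>
      h.insert e.2.1 (((h.get? e.2.1).getD []) ++ [e.2.2])) heads0
  let result : PySem.Dict String (List (String × Int)) :=
    ts.foldl (fun res t =>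
      let items := PySem.Dict.ofList t.2
      let tail := items.items.filter (fun q => !(item_order.contains q.1))
      res.insert t.1 (((heads.get? t.1).getD []) ++ tail)) PySem.Dict.empty
  result.items

-- ===== PRECONDITION & SPEC =====
def Spec_sort_transaction_items_by_total_order (transactions : List (String × List (String × Int))) (sorted_secondary_a : List String) (out : List (String × List (String × Int))) : Prop := out = sort_transaction_items_by_total_order_alt transactions sorted_secondary_a
instance (transactions : List (String × List (String × Int))) (sorted_secondary_a : List String) (out : List (String × List (String × Int))) : Decidable (Spec_sort_transaction_items_by_total_order transactions sorted_secondary_a out) := by unfold Spec_sort_transaction_items_by_total_order; infer_instance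

-- ===== CLAIM (what is proved, stated in full; the proofs are below) =====
def Claim_equal_sort_transaction_items_by_total_order : Prop := ∀ (transactions : List (String × List (String × Int))) (sorted_secondary_a : List String), Dom_sort_transaction_items_by_total_order transactions sorted_secondary_a → Spec_sort_transaction_items_by_total_order transactions sorted_secondary_a (sort_transaction_items_by_total_order transactions sorted_secondary_a)

-- ===== LEMMAS AND PROOFS =====

-- insertBy into A ++ B lands inside A when every element of B triggers `before`.
theorem pv_insertBy_append_before {α : Type} (bf : α → α → Bool) (x : α) (A B : List α)
    (hB : ∀ b ∈ B, bf x b = true) :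
    PySem.List.insertBy bf x (A ++ B) = PySem.List.insertBy bf x A ++ B := by
  induction A with
  | nil =>
    cases B with
    | nil => simp
    | cons b bs => simp [PySem.List.insertBy, hB b (by simp)]
  | cons a A ih =>
    by_cases h : bf x a = true <;> simp [PySem.List.insertBy, h, ih]

-- stability split: all keys ≤ n, then sorting = sorting the (< n)-part, the (= n)-part stays in order.
theorem pv_sorted_split {α : Type} (key : α → Int) (n : Int) (l : List α)
    (h : ∀ x ∈ l, key x ≤ n) :
    PySem.List.sorted l key =
      PySem.List.sorted (l.filter (fun x => decide (key x < n))) key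
        ++ l.filter (fun x => !decide (key x < n)) := by
  induction l using List.reverseRecOn with
  | nil => simp [PySem.List.sorted]
  | append_singleton l x ih =>
    have hl : ∀ y ∈ l, key y ≤ n := fun y hy => h y (by simp [hy])
    have hx : key x ≤ n := h x (by simp)
    rw [PySem.List.sorted_eq_foldl_insertBy, List.foldl_append]
    simp only [List.foldl_cons, List.foldl_nil]
    rw [← PySem.List.sorted_eq_foldl_insertBy, ih hl, List.filter_append, List.filter_append]
    by_cases hxn : key x < n
    · have hfp : List.filter (fun y => decide (key y < n)) [x] = [x] := by simp [hxn]
      have hfn : List.filter (fun y => !decide (key y < n)) [x] = [] := by simp [hxn]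
      rw [hfp, hfn, List.append_nil]
      rw [pv_insertBy_append_before _ x _ _ (by
        intro b hb
        simp only [List.mem_filter, Bool.not_eq_eq_eq_not, Bool.not_true,
          decide_eq_false_iff_not, not_lt] at hb
        exact decide_eq_true (lt_of_lt_of_le hxn hb.2))]
      rw [PySem.List.sorted_eq_foldl_insertBy
        (List.filter (fun y => decide (key y < n)) l ++ [x]), List.foldl_append]
      simp only [List.foldl_cons, List.foldl_nil, ← PySem.List.sorted_eq_foldl_insertBy]
    · have hfp : List.filter (fun y => decide (key y < n)) [x] = [] := by simp [hxn]
      have hfn : List.filter (fun y => !decide (key y < n)) [x] = [x] := by simp [hxn]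
      rw [hfp, hfn, List.append_nil]
      rw [PySem.List.insertBy_of_forall_not_before _ x _ (by
        intro y hy
        rcases List.mem_append.1 hy with hy | hy
        · have := (PySem.List.mem_sorted (l.filter (fun z => decide (key z < n))) key false y).1 hy
          have hyl : y ∈ l := (List.mem_filter.1 this).1
          exact decide_eq_false (not_lt.2 (le_trans (hl y hyl) (not_lt.1 hxn)))
        · have hyl : y ∈ l := (List.mem_filter.1 hy).1
          exact decide_eq_false (not_lt.2 (le_trans (hl y hyl) (not_lt.1 hxn))))]
      simp

-- lookup in the enumerate-fold: last matching pair wins.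
theorem pv_foldl_insert_get? (ps : List (Int × String)) (d : PySem.Dict String Int) (k : String) :
    (ps.foldl (fun d p => d.insert p.2 p.1) d).get? k
      = ((ps.reverse.find? (fun p => p.2 == k)).map Prod.fst).or (d.get? k) := by
  induction ps generalizing d with
  | nil => simp
  | cons p ps ih =>
    simp only [List.foldl_cons, ih, List.reverse_cons, List.find?_append]
    cases hf : ps.reverse.find? (fun p => p.2 == k) with
    | some q => simp
    | none =>
      simp only [Option.or, Option.map_none]
      by_cases hpk : p.2 = k
      · simp [List.find?, hpk]
      · have hne : ¬ k = p.2 := fun h => hpk h.symm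
        have hb : (p.2 == k) = false := beq_eq_false_iff_ne.2 hpk
        simp [List.find?, hb, PySem.Dict.get?_insert, hne]

theorem pv_itemOrder_get_mem (ssa : List String) (k : String) (i : Int)
    (h : (pvItemOrder ssa).get? k = some i) : (i, k) ∈ PySem.List.enumerate ssa 0 := by
  unfold pvItemOrder at h
  rw [pv_foldl_insert_get?] at h
  cases hf : (PySem.List.enumerate ssa).reverse.find? (fun p => p.2 == k) with
  | none => simp [hf] at h
  | some q =>
    rw [hf] at h
    simp only [Option.map_some, Option.or] at h
    have hq1 : q.1 = i := by simpa using h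
    have hq2 : q.2 = k := by simpa using List.find?_some hf
    have hqm : q ∈ PySem.List.enumerate ssa 0 := List.mem_reverse.1 (List.mem_of_find?_eq_some hf)
    have : q = (i, k) := Prod.ext hq1 hq2
    rwa [this] at hqm

theorem pv_itemOrder_get_bounds (ssa : List String) (k : String) (i : Int)
    (h : (pvItemOrder ssa).get? k = some i) : 0 ≤ i ∧ i < (ssa.length : Int) := by
  have := pv_itemOrder_get_mem ssa k i h
  rw [PySem.List.mem_enumerate_iff] at this
  obtain ⟨m, hm, hp⟩ := this
  have : i = (m : Int) := by simpa using congrArg Prod.fst hp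
  subst this
  constructor
  · exact Int.natCast_nonneg m
  · exact_mod_cast hm

theorem pv_itemOrder_get_inj (ssa : List String) (a b : String) (i : Int)
    (ha : (pvItemOrder ssa).get? a = some i) (hb : (pvItemOrder ssa).get? b = some i) : a = b := by
  have hma := pv_itemOrder_get_mem ssa a i ha
  have hmb := pv_itemOrder_get_mem ssa b i hb
  rw [PySem.List.mem_enumerate_iff] at hma hmb
  obtain ⟨m, hm, hp⟩ := hma
  obtain ⟨m', hm', hp'⟩ := hmb
  have h1 : i = (m : Int) ∧ a = ssa[m] := by
    constructor
    · simpa using congrArg Prod.fst hp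
    · simpa using congrArg Prod.snd hp
  have h2 : i = (m' : Int) ∧ b = ssa[m'] := by
    constructor
    · simpa using congrArg Prod.fst hp'
    · simpa using congrArg Prod.snd hp'
  have hmm : m = m' := by
    have := h1.1 ▸ h2.1
    exact_mod_cast this
  subst hmm
  exact h1.2.trans h2.2.symm

-- the sort key of A tests < len exactly when the item is in item_order
theorem pv_key_lt_iff_contains (ssa : List String) (k : String) :
    decide (((pvItemOrder ssa).get? k).getD ((ssa.length : Int)) < (ssa.length : Int))
      = (pvItemOrder ssa).contains k := by
  rw [PySem.Dict.contains_eq_isSome_get?]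
  cases h : (pvItemOrder ssa).get? k with
  | none => simp
  | some i =>
    have := pv_itemOrder_get_bounds ssa k i h
    simp [this.2]

-- every pair of a dict's items is (key, getD key)
theorem pv_mem_items_eq {ν : Type} (d : PySem.Dict String ν) (v0 : ν) (hnd : d.keys.Nodup)
    (x : String × ν) (hx : x ∈ d.items) : x = (x.1, d.getD x.1 v0) := by
  rw [PySem.Dict.items_eq_map_keys d hnd v0] at hx
  obtain ⟨k, _, hk⟩ := List.mem_map.1 hx
  rw [← hk]

theorem pv_nodup_items {ν : Type} (d : PySem.Dict String ν) (v0 : ν) (hnd : d.keys.Nodup) :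
    d.items.Nodup := by
  rw [PySem.Dict.items_eq_map_keys d hnd v0]
  exact hnd.map (fun a b h => by simpa using congrArg Prod.fst h)

theorem pv_map_fst_items {ν : Type} (d : PySem.Dict String ν) (v0 : ν) (hnd : d.keys.Nodup) :
    d.items.map Prod.fst = d.keys := by
  rw [PySem.Dict.items_eq_map_keys d hnd v0, List.map_map]
  simp [Function.comp_def]

-- keys untouched by a fold of inserts under other keys keep their binding.
theorem pv_foldl_insert_keep {ν β : Type} (l : List β) (kf : β → String) (vf : β → ν)
    (h : PySem.Dict String ν) (x : String) (hx : ∀ b ∈ l, kf b ≠ x) :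
    (l.foldl (fun h b => h.insert (kf b) (vf b)) h).get? x = h.get? x := by
  induction l generalizing h with
  | nil => rfl
  | cons b l ih =>
    simp only [List.foldl_cons]
    rw [ih _ (fun c hc => hx c (by simp [hc]))]
    rw [PySem.Dict.get?_insert]
    have : x ≠ kf b := fun hh => hx b (by simp) hh.symm
    simp [this]

-- heads initialisation: every transaction id is bound to [].
theorem pv_heads0_get_gen (ts : List (String × List (String × Int)))
    (h0 : PySem.Dict String (List (String × Int))) (x : String)
    (hx : x ∈ ts.map Prod.fst) :
    (ts.foldl (fun h t => h.insert t.1 ([] : List (String × Int))) h0).get? x = some [] := by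
  induction ts generalizing h0 with
  | nil => exact absurd hx (by simp)
  | cons t ts ih =>
    rw [List.foldl_cons]
    by_cases hmem : x ∈ ts.map Prod.fst
    · exact ih _ hmem
    · have hxt : x = t.1 := by
        rcases List.mem_map.1 hx with ⟨w, hw, hwx⟩
        rcases List.mem_cons.1 hw with hw | hw
        · rw [← hwx, hw]
        · exact absurd (List.mem_map.2 ⟨w, hw, hwx⟩) hmem
      rw [pv_foldl_insert_keep ts Prod.fst (fun _ => []) _ x
          (fun b hb hbx => hmem (hbx ▸ List.mem_map.2 ⟨b, hb, rfl⟩))]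
      rw [hxt, PySem.Dict.get?_insert_self]

theorem pv_heads0_get (ts : List (String × List (String × Int))) (x : String)
    (hx : x ∈ ts.map Prod.fst) :
    (ts.foldl (fun h t => h.insert t.1 ([] : List (String × Int)))
      PySem.Dict.empty).get? x = some [] := pv_heads0_get_gen ts PySem.Dict.empty x hx

-- distribution: appending each pool entry to its transaction's list, read back per id.
theorem pv_distribute (l : List (Int × String × String × Int))
    (h : PySem.Dict String (List (String × Int))) (t : String) (cur : List (String × Int))
    (hcur : h.get? t = some cur) :
    (l.foldl (fun h e => h.insert e.2.1 (((h.get? e.2.1).getD []) ++ [e.2.2])) h).get? t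
      = some (cur ++ (l.filter (fun e => e.2.1 == t)).map (fun e => e.2.2)) := by
  induction l generalizing h cur with
  | nil => simpa using hcur
  | cons e l ih =>
    simp only [List.foldl_cons]
    by_cases het : e.2.1 = t
    · rw [ih _ (cur ++ [e.2.2]) (by rw [het, hcur, PySem.Dict.get?_insert_self]; simp)]
      have hb : (e.2.1 == t) = true := beq_iff_eq.2 het
      simp [hb]
    · have hne : t ≠ e.2.1 := fun hh => het hh.symm
      rw [ih _ cur (by rw [PySem.Dict.get?_insert]; simp [hne, hcur])]
      have hb : (e.2.1 == t) = false := beq_eq_false_iff_ne.2 het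
      simp [hb]

-- with pairwise-distinct transaction ids, filtering the pool by one id recovers
-- that transaction's own contribution.
theorem pv_pool_filter (F : (String × List (String × Int)) → List (Int × String × String × Int))
    (hF : ∀ u e, e ∈ F u → e.2.1 = u.1)
    (ts : List (String × List (String × Int))) (hnod : (ts.map Prod.fst).Nodup)
    (t : String × List (String × Int)) (ht : t ∈ ts) :
    (ts.flatMap F).filter (fun e => e.2.1 == t.1) = F t := by
  induction ts with
  | nil => cases ht
  | cons a ts ih =>
    rw [List.flatMap_cons, List.filter_append]
    rw [List.map_cons, List.nodup_cons] at hnod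
    rcases List.mem_cons.1 ht with hta | hta
    · subst hta
      have h1 : (F t).filter (fun e => e.2.1 == t.1) = F t :=
        List.filter_eq_self.2 (fun e he => beq_iff_eq.2 (hF t e he))
      have h2 : (ts.flatMap F).filter (fun e => e.2.1 == t.1) = [] := by
        refine List.filter_eq_nil_iff.2 (fun e he => ?_)
        obtain ⟨u, hu, heu⟩ := List.mem_flatMap.1 he
        have heq : e.2.1 = u.1 := hF u e heu
        have hne : u.1 ≠ t.1 := fun hh => hnod.1 (hh ▸ List.mem_map.2 ⟨u, hu, rfl⟩)
        simp [heq, hne]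
      rw [h1, h2, List.append_nil]
    · have hne : a.1 ≠ t.1 := fun hh => hnod.1 (hh ▸ List.mem_map.2 ⟨t, hta, rfl⟩)
      have h1 : (F a).filter (fun e => e.2.1 == t.1) = [] := by
        refine List.filter_eq_nil_iff.2 (fun e he => ?_)
        have heq : e.2.1 = a.1 := hF a e he
        simp [heq, hne]
      rw [h1, ih hnod.2 hta, List.nil_append]

-- the decorated entries of one transaction, undecorated, are its ordered items …
theorem pv_F_map_val (ssa : List String) (tid : String) (l : List (String × Int)) :
    ((l.filterMap (fun q => match (pvItemOrder ssa).get? q.1 with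
      | some r => some (r, (tid, q)) | none => none)).map (fun e => e.2.2))
    = l.filter (fun q => (pvItemOrder ssa).contains q.1) := by
  induction l with
  | nil => rfl
  | cons q l ih =>
    rw [List.filterMap_cons, List.filter_cons]
    cases hg : (pvItemOrder ssa).get? q.1 with
    | none =>
      have hc : (pvItemOrder ssa).contains q.1 = false := by
        rw [PySem.Dict.contains_eq_isSome_get?, hg]; rfl
      simp [hc, ih]
    | some r =>
      have hc : (pvItemOrder ssa).contains q.1 = true := by
        rw [PySem.Dict.contains_eq_isSome_get?, hg]; rfl
      simp [hc, ih]

-- … and their ranks are those items' order indices.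
theorem pv_F_map_fst (ssa : List String) (tid : String) (l : List (String × Int)) :
    ((l.filterMap (fun q => match (pvItemOrder ssa).get? q.1 with
      | some r => some (r, (tid, q)) | none => none)).map (fun e => e.1))
    = l.filterMap (fun q => (pvItemOrder ssa).get? q.1) := by
  induction l with
  | nil => rfl
  | cons q l ih =>
    rw [List.filterMap_cons, List.filterMap_cons]
    cases hg : (pvItemOrder ssa).get? q.1 with
    | none => simp [ih]
    | some r => simp [ih]

theorem pv_nodup_filterMap_on {α β : Type} (f : α → Option β) (l : List α) (hl : l.Nodup)
    (hinj : ∀ a ∈ l, ∀ b ∈ l, ∀ c, f a = some c → f b = some c → a = b) :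
    (l.filterMap f).Nodup := by
  induction l with
  | nil => simp
  | cons a l ih =>
    rw [List.filterMap_cons]
    rw [List.nodup_cons] at hl
    have hinj' : ∀ x ∈ l, ∀ y ∈ l, ∀ c, f x = some c → f y = some c → x = y :=
      fun x hx y hy => hinj x (List.mem_cons_of_mem _ hx) y (List.mem_cons_of_mem _ hy)
    cases hf : f a with
    | none => exact ih hl.2 hinj'
    | some c =>
      refine List.nodup_cons.2 ⟨?_, ih hl.2 hinj'⟩
      intro hc
      obtain ⟨b, hb, hbc⟩ := List.mem_filterMap.1 hc
      have hba : b = a := hinj b (List.mem_cons_of_mem _ hb) a (by simp) c hbc hf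
      exact hl.1 (hba ▸ hb)

-- B's intermediate structures, named for the proofs (definitionally the port's let-bindings).
def pvF (ssa : List String) (t : String × List (String × Int)) :
    List (Int × String × String × Int) :=
  (PySem.Dict.ofList t.2).items.filterMap (fun q =>
    match (pvItemOrder ssa).get? q.1 with
    | some r => some (r, (t.1, q))
    | none => none)

def pvPool' (transactions : List (String × List (String × Int))) (ssa : List String) :
    List (Int × String × String × Int) :=
  PySem.List.sorted ((PySem.Dict.ofList transactions).items.flatMap (pvF ssa)) (fun e => e.1)

def pvHeads0 (transactions : List (String × List (String × Int))) :
    PySem.Dict String (List (String × Int)) :=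
  (PySem.Dict.ofList transactions).items.foldl
    (fun h t => h.insert t.1 ([] : List (String × Int))) PySem.Dict.empty

def pvHeads (transactions : List (String × List (String × Int))) (ssa : List String) :
    PySem.Dict String (List (String × Int)) :=
  (pvPool' transactions ssa).foldl
    (fun h e => h.insert e.2.1 (((h.get? e.2.1).getD []) ++ [e.2.2])) (pvHeads0 transactions)

-- per-transaction core: A's stable sort of one transaction = its share of B's
-- globally sorted pool + the unordered rest.
theorem pv_items_core (transactions : List (String × List (String × Int))) (ssa : List String)
    (t : String × List (String × Int)) (ht : t ∈ (PySem.Dict.ofList transactions).items) :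
    PySem.List.sorted (PySem.Dict.ofList t.2).items
        (fun item => (((pvItemOrder ssa).get? item.1).getD ((ssa.length : Int))))
      = ((pvHeads transactions ssa).get? t.1).getD []
        ++ (PySem.Dict.ofList t.2).items.filter (fun q => !((pvItemOrder ssa).contains q.1)) := by
  set io := pvItemOrder ssa with hio
  set n : Int := (ssa.length : Int) with hn
  set key : String × Int → Int := fun item => ((io.get? item.1).getD n) with hkey
  set l := (PySem.Dict.ofList t.2).items with hl
  set ts := (PySem.Dict.ofList transactions).items with hts
  have hkeysnod := PySem.Dict.nodup_keys_ofList transactions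
  have hnod : (ts.map Prod.fst).Nodup := by
    rw [hts, pv_map_fst_items _ [] hkeysnod]; exact hkeysnod
  have htid : t.1 ∈ ts.map Prod.fst := List.mem_map.2 ⟨t, ht, rfl⟩
  have h0 : (pvHeads0 transactions).get? t.1 = some [] := pv_heads0_get ts t.1 htid
  have hdist : (pvHeads transactions ssa).get? t.1
      = some ([] ++ ((pvPool' transactions ssa).filter (fun e => e.2.1 == t.1)).map
          (fun e => e.2.2)) :=
    pv_distribute (pvPool' transactions ssa) (pvHeads0 transactions) t.1 [] h0
  -- the pool's entries carry their own transaction id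
  have hF : ∀ u e, e ∈ pvF ssa u → e.2.1 = u.1 := by
    intro u e he
    obtain ⟨q, hq, hqe⟩ := List.mem_filterMap.1 he
    cases hg : (pvItemOrder ssa).get? q.1 with
    | none => rw [hg] at hqe; cases hqe
    | some r => rw [hg] at hqe; cases hqe; rfl
  have hfilter_pool : ((ts.flatMap (pvF ssa)).filter (fun e => e.2.1 == t.1)) = pvF ssa t :=
    pv_pool_filter (pvF ssa) hF ts hnod t ht
  have hperm0 : (pvPool' transactions ssa).Perm (ts.flatMap (pvF ssa)) :=
    PySem.List.sorted_perm _ _ _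
  have hpermfil : ((pvPool' transactions ssa).filter (fun e => e.2.1 == t.1)).Perm (pvF ssa t) :=
    hfilter_pool ▸ hperm0.filter _
  -- undecorating the share gives exactly this transaction's ordered items
  have hmapval : (pvF ssa t).map (fun e => e.2.2) = l.filter (fun q => io.contains q.1) :=
    pv_F_map_val ssa t.1 l
  have hys_perm : (((pvPool' transactions ssa).filter (fun e => e.2.1 == t.1)).map
      (fun e => e.2.2)).Perm (l.filter (fun q => io.contains q.1)) := by
    rw [← hmapval]; exact hpermfil.map _
  -- strictly increasing keys along the share
  have hlnod : l.Nodup := pv_nodup_items _ 0 (PySem.Dict.nodup_keys_ofList t.2)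
  have hnodfstF : ((pvF ssa t).map (fun e => e.1)).Nodup := by
    rw [show (pvF ssa t).map (fun e => e.1) = l.filterMap (fun q => io.get? q.1) from
      pv_F_map_fst ssa t.1 l]
    refine pv_nodup_filterMap_on _ _ hlnod ?_
    intro a ha b hb c hac hbc
    have hkeq : a.1 = b.1 := pv_itemOrder_get_inj ssa a.1 b.1 c hac hbc
    rw [pv_mem_items_eq _ 0 (PySem.Dict.nodup_keys_ofList t.2) a ha,
      pv_mem_items_eq _ 0 (PySem.Dict.nodup_keys_ofList t.2) b hb, hkeq]
  have hnodfst : (((pvPool' transactions ssa).filter (fun e => e.2.1 == t.1)).map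
      (fun e => e.1)).Nodup := ((hpermfil.map _).symm).nodup hnodfstF
  have hinv : ∀ e ∈ pvPool' transactions ssa, io.get? e.2.2.1 = some e.1 := by
    intro e he
    have : e ∈ ts.flatMap (pvF ssa) := hperm0.subset he
    obtain ⟨u, hu, heu⟩ := List.mem_flatMap.1 this
    obtain ⟨q, hq, hqe⟩ := List.mem_filterMap.1 heu
    cases hg : (pvItemOrder ssa).get? q.1 with
    | none => rw [hg] at hqe; cases hqe
    | some r => rw [hg] at hqe; cases hqe; exact hg
  have hple : List.Pairwise (fun a b => a.1 ≤ b.1)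
      ((pvPool' transactions ssa).filter (fun e => e.2.1 == t.1)) :=
    List.Pairwise.sublist List.filter_sublist (PySem.List.sorted_pairwise _ _)
  have hpneq : List.Pairwise (fun a b => a.1 ≠ b.1)
      ((pvPool' transactions ssa).filter (fun e => e.2.1 == t.1)) :=
    List.pairwise_map.1 hnodfst
  have hplt : List.Pairwise (fun a b => a.1 < b.1)
      ((pvPool' transactions ssa).filter (fun e => e.2.1 == t.1)) :=
    (hple.and hpneq).imp (fun h => lt_of_le_of_ne h.1 h.2)
  have hpkey : List.Pairwise (fun a b => key a < key b)
      (((pvPool' transactions ssa).filter (fun e => e.2.1 == t.1)).map (fun e => e.2.2)) := by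
    rw [List.pairwise_map]
    refine hplt.imp_of_mem ?_
    intro a b ha hb hab
    have ha' := hinv a (List.mem_of_mem_filter ha)
    have hb' := hinv b (List.mem_of_mem_filter hb)
    show key a.2.2 < key b.2.2
    simp only [hkey, ha', hb', Option.getD_some]
    exact hab
  have hbound : ∀ x ∈ l, key x ≤ n := by
    intro x _
    simp only [hkey]
    cases h : io.get? x.1 with
    | none => simp
    | some i => simpa using le_of_lt (pv_itemOrder_get_bounds ssa x.1 i h).2
  have hpred : ∀ x : String × Int, decide (key x < n) = io.contains x.1 := fun x =>
    pv_key_lt_iff_contains ssa x.1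
  rw [pv_sorted_split key n l hbound, hdist]
  simp only [Option.getD_some, List.nil_append]
  congr 1
  · refine PySem.List.sorted_eq_of_perm_of_pairwise_lt _ _ key ?_ hpkey
    rw [List.filter_congr (fun x _ => hpred x)]
    exact hys_perm
  · exact List.filter_congr (fun x _ => by rw [hpred x])

-- ===== VERDICT (by name: the statement is the Claim_ definition above) =====
theorem sort_transaction_items_by_total_order_spec : Claim_equal_sort_transaction_items_by_total_order := by
  intro transactions ssa _
  show sort_transaction_items_by_total_order transactions ssa
      = sort_transaction_items_by_total_order_alt transactions ssa
  unfold sort_transaction_items_by_total_order sort_transaction_items_by_total_order_alt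
  simp only []
  congr 1
  apply PySem.List.foldl_congr_mem
  intro acc t ht
  rw [pv_items_core transactions ssa t ht]
  rfl
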